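-- pv_equiv track=rewrite | github.com/paperwork-labs/paperwork | apis/brain/app/services/agent.py | _check_investment_advice
-- ===== SOURCE A (Python) =====
-- def _check_investment_advice(text: str) -> bool:
--     """Check for directive investment advice."""
--     directive_phrases = [
--         "you should buy",
--         "you should sell",
--         "i recommend buying",
--         "i recommend selling",
--         "you need to invest in",
--         "buy this stock",
--     ]
--     lower = text.lower()
--     return any(phrase in lower for phrase in directive_phrases)
-- ===== SOURCE B (Python) =====
-- _PHRASES = (
--     "you should buy",
--     "you should sell",
--     "i recommend buying",
--     "i recommend selling",
--     "you need to invest in",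
--     "buy this stock",
-- )
--
--
-- def _check_investment_advice(text: str) -> bool:
--     """Check for directive investment advice (single left-to-right scan)."""
--     lower = text.lower()
--     for i in range(len(lower)):
--         for phrase in _PHRASES:
--             if lower.startswith(phrase, i):
--                 return True
--     return False
-- ===== Notes on version B (the rewrite author's own statement) =====
-- stated objective: alternative
-- what changed: Replaces six independent full substring scans (any(phrase in lower)) by one left-to-right pass over the lowercased text that tests all six phrases as prefixes at each position and returns True at the first hit.
import Mathlib
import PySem

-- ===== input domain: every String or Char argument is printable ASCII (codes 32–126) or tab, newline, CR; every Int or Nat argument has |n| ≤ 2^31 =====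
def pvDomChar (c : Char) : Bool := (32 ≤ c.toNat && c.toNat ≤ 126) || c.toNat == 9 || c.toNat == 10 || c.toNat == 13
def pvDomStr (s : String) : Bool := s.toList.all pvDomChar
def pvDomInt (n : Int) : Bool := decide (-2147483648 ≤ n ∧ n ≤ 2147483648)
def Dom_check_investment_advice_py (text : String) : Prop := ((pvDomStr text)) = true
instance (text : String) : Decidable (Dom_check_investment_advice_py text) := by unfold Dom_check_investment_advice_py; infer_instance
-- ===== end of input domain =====

-- B replaces six independent substring scans by one left-to-right positional scan testing all six phrases as prefixes (alternative decomposition, same cost).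


-- ===== PORT A =====
def check_investment_advice_py (text : String) : Bool :=
  let directive_phrases : List String :=
    ["you should buy", "you should sell", "i recommend buying",
     "i recommend selling", "you need to invest in", "buy this stock"]
  let lower := PySem.Str.lower text
  directive_phrases.any (fun phrase => PySem.Str.isIn phrase lower)

-- ===== PORT B =====
def pvPhrases : List String :=
  ["you should buy", "you should sell", "i recommend buying",
   "i recommend selling", "you need to invest in", "buy this stock"]

def pvPhrasesChars : List (List Char) := pvPhrases.map String.toList

-- the index loop of Source B: at each position (suffix) test the six phrases as prefixes
def pvScan (s : List Char) : Bool :=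
  match s with
  | [] => false
  | c :: rest =>
      pvPhrasesChars.any (fun p => PySem.Chars.startswith (c :: rest) p) || pvScan rest

def check_investment_advice_py_alt (text : String) : Bool :=
  pvScan (PySem.Chars.lower text.toList)

-- ===== PRECONDITION & SPEC =====
def Spec_check_investment_advice_py (text : String) (out : Bool) : Prop := out = check_investment_advice_py_alt text
instance (text : String) (out : Bool) : Decidable (Spec_check_investment_advice_py text out) := by unfold Spec_check_investment_advice_py; infer_instance

-- ===== CLAIM (what is proved, stated in full; the proofs are below) =====
def Claim_equal_check_investment_advice_py : Prop := ∀ (text : String), Dom_check_investment_advice_py text → Spec_check_investment_advice_py text (check_investment_advice_py text)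

-- ===== LEMMAS AND PROOFS =====

lemma pvPhrases_ne_nil : ∀ p ∈ pvPhrasesChars, p ≠ [] := by decide

lemma pvScan_iff (s : List Char) :
    pvScan s = true ↔ ∃ p ∈ pvPhrasesChars, ∃ j, p <+: s.drop j := by
  induction s with
  | nil =>
      simp only [pvScan]
      constructor
      · intro h; cases h
      · rintro ⟨p, hp, j, hpre⟩
        simp only [List.drop_nil] at hpre
        exact absurd (List.prefix_nil.mp hpre) (pvPhrases_ne_nil p hp)
  | cons c rest ih =>
      simp only [pvScan, Bool.or_eq_true, List.any_eq_true, ih,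
        PySem.Chars.startswith_iff]
      constructor
      · rintro (⟨p, hp, hpre⟩ | ⟨p, hp, j, hpre⟩)
        · exact ⟨p, hp, 0, by simpa using hpre⟩
        · exact ⟨p, hp, j + 1, by simpa using hpre⟩
      · rintro ⟨p, hp, j, hpre⟩
        cases j with
        | zero => exact Or.inl ⟨p, hp, by simpa using hpre⟩
        | succ k => exact Or.inr ⟨p, hp, k, by simpa using hpre⟩

lemma pvScan_iff_isIn (s : List Char) :
    pvScan s = true ↔ ∃ p ∈ pvPhrasesChars, PySem.Chars.isIn p s = true := by
  rw [pvScan_iff]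
  constructor
  · rintro ⟨p, hp, j, hpre⟩
    exact ⟨p, hp, (PySem.Chars.exists_prefix_drop_iff_isIn p s).mp ⟨j, hpre⟩⟩
  · rintro ⟨p, hp, h⟩
    obtain ⟨j, hpre⟩ := (PySem.Chars.exists_prefix_drop_iff_isIn p s).mpr h
    exact ⟨p, hp, j, hpre⟩
-- ===== VERDICT (by name: the statement is the Claim_ definition above) =====
theorem check_investment_advice_py_spec : Claim_equal_check_investment_advice_py := by
  intro text _
  unfold Spec_check_investment_advice_py check_investment_advice_py check_investment_advice_py_alt
  rw [Bool.eq_iff_iff]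
  rw [pvScan_iff_isIn, ← PySem.Str.toList_lower]
  simp only [List.any_eq_true, pvPhrasesChars, pvPhrases, List.mem_map,
    PySem.Str.isIn_iff_infix, PySem.Chars.isIn_iff_infix]
  constructor
  · rintro ⟨phrase, hm, h⟩; exact ⟨phrase.toList, ⟨phrase, hm, rfl⟩, h⟩
  · rintro ⟨p, ⟨phrase, hm, rfl⟩, h⟩; exact ⟨phrase, hm, h⟩
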